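-- pv_equiv track=rewrite | github.com/MahendraMedapati27/SamvadDB_Backend | agents.py | _generate_fallback_suggestions
-- ===== SOURCE A (Python) =====
-- from typing import Dict, List, Any, Optional, Tuple, Union, Callable
--
-- def _generate_fallback_suggestions(tables: List[str]) -> List[str]:
--     """Generate fallback suggestions when AI generation fails.
--
--     Args:
--         tables (List[str]): List of table names.
--
--     Returns:
--         List[str]: Fallback suggestions.
--     """
--     if not tables:
--         return ["No tables available for querying"]
--
--     # Generate basic suggestions based on table names
--     suggestions = []
--
--     for table in tables[:3]:  # Limit to first 3 tables
--         table_lower = table.lower()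
--         if 'customer' in table_lower or 'user' in table_lower:
--             suggestions.append(f"Show me all {table}")
--             suggestions.append(f"Find {table} by name")
--         elif 'order' in table_lower or 'transaction' in table_lower:
--             suggestions.append(f"Show recent {table}")
--             suggestions.append(f"Calculate total {table} amount")
--         elif 'product' in table_lower or 'item' in table_lower:
--             suggestions.append(f"List all {table}")
--             suggestions.append(f"Find {table} by category")
--         else:
--             suggestions.append(f"Show me the {table} data")
--             suggestions.append(f"What's in the {table} table?")
--
--     # Add some general suggestions
--     if len(suggestions) < 4:
--         suggestions.extend([
--             "Show me a sample of the data",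
--             "What tables are available?",
--             "Generate a summary report"
--         ])
--
--     return suggestions[:4]  # Return max 4 suggestions
-- ===== SOURCE B (Python) =====
-- def _suggestion_pair(t):
--     tl = t.lower()
--     if 'customer' in tl or 'user' in tl:
--         return (f"Show me all {t}", f"Find {t} by name")
--     if 'order' in tl or 'transaction' in tl:
--         return (f"Show recent {t}", f"Calculate total {t} amount")
--     if 'product' in tl or 'item' in tl:
--         return (f"List all {t}", f"Find {t} by category")
--     return (f"Show me the {t} data", f"What's in the {t} table?")
--
--
-- def _generate_fallback_suggestions(tables):
--     # Closed form: each table yields exactly 2 suggestions and the result is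
--     # capped at 4, so only the first two tables can ever matter; generics are
--     # appended only when there is at most one table.
--     if not tables:
--         return ["No tables available for querying"]
--     a, b = _suggestion_pair(tables[0])
--     if len(tables) == 1:
--         return [a, b, "Show me a sample of the data", "What tables are available?"]
--     c, d = _suggestion_pair(tables[1])
--     return [a, b, c, d]
-- ===== Notes on version B (the rewrite author's own statement) =====
-- stated objective: simpler
-- what changed: Replaces the loop over tables[:3] plus length check and truncation with a closed-form case analysis on the list shape: since each table contributes exactly 2 suggestions and the output is capped at 4, only the first two tables can matter, so B never loops, slices or truncates.
import Mathlib
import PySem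

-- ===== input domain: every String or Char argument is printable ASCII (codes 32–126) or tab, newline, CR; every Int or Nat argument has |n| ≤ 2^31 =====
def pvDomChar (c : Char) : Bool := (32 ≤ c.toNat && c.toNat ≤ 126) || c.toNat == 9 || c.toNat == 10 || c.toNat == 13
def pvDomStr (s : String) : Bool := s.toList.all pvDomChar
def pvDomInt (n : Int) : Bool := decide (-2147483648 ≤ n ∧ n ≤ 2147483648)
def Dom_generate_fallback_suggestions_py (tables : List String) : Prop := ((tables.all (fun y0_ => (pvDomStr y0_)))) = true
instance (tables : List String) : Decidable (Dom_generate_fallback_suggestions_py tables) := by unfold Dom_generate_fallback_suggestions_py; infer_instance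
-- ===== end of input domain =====

-- B replaces A's loop over tables[:3] + length check + truncation with a closed-form
-- case analysis on the list shape (only the first two tables can matter); simpler, same result.

-- ===== PORT A =====
def generate_fallback_suggestions_py (tables : List String) : List String :=
  if tables = [] then ["No tables available for querying"]
  else
    let suggestions : List String := []
    let suggestions := (tables.take 3).foldl (fun suggestions table =>
      let table_lower := PySem.Str.lower table
      if PySem.Str.isIn "customer" table_lower || PySem.Str.isIn "user" table_lower then
        suggestions ++ ["Show me all " ++ table, "Find " ++ table ++ " by name"]
      else if PySem.Str.isIn "order" table_lower || PySem.Str.isIn "transaction" table_lower then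
        suggestions ++ ["Show recent " ++ table, "Calculate total " ++ table ++ " amount"]
      else if PySem.Str.isIn "product" table_lower || PySem.Str.isIn "item" table_lower then
        suggestions ++ ["List all " ++ table, "Find " ++ table ++ " by category"]
      else
        suggestions ++ ["Show me the " ++ table ++ " data",
                        "What's in the " ++ table ++ " table?"]) suggestions
    let suggestions := if suggestions.length < 4 then
        suggestions ++ ["Show me a sample of the data", "What tables are available?",
                        "Generate a summary report"]
      else suggestions
    suggestions.take 4

-- ===== PORT B =====
def pvSuggestionPair (t : String) : String × String :=
  let tl := PySem.Str.lower t
  if PySem.Str.isIn "customer" tl || PySem.Str.isIn "user" tl then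
    ("Show me all " ++ t, "Find " ++ t ++ " by name")
  else if PySem.Str.isIn "order" tl || PySem.Str.isIn "transaction" tl then
    ("Show recent " ++ t, "Calculate total " ++ t ++ " amount")
  else if PySem.Str.isIn "product" tl || PySem.Str.isIn "item" tl then
    ("List all " ++ t, "Find " ++ t ++ " by category")
  else
    ("Show me the " ++ t ++ " data", "What's in the " ++ t ++ " table?")

def generate_fallback_suggestions_py_alt (tables : List String) : List String :=
  match tables with
  | [] => ["No tables available for querying"]
  | [t] =>
    let p := pvSuggestionPair t
    [p.1, p.2, "Show me a sample of the data", "What tables are available?"]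
  | t1 :: t2 :: _ =>
    let p := pvSuggestionPair t1
    let q := pvSuggestionPair t2
    [p.1, p.2, q.1, q.2]

-- ===== PRECONDITION & SPEC =====
def Spec_generate_fallback_suggestions_py (tables : List String) (out : List String) : Prop := out = generate_fallback_suggestions_py_alt tables
instance (tables : List String) (out : List String) : Decidable (Spec_generate_fallback_suggestions_py tables out) := by unfold Spec_generate_fallback_suggestions_py; infer_instance

-- ===== CLAIM (what is proved, stated in full; the proofs are below) =====
def Claim_equal_generate_fallback_suggestions_py : Prop := ∀ (tables : List String), Dom_generate_fallback_suggestions_py tables → Spec_generate_fallback_suggestions_py tables (generate_fallback_suggestions_py tables)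

-- ===== LEMMAS AND PROOFS =====

-- A's loop step appends exactly the pair B computes for that table
theorem stepA_eq (acc : List String) (table : String) :
    (let table_lower := PySem.Str.lower table
     if PySem.Str.isIn "customer" table_lower || PySem.Str.isIn "user" table_lower then
       acc ++ ["Show me all " ++ table, "Find " ++ table ++ " by name"]
     else if PySem.Str.isIn "order" table_lower || PySem.Str.isIn "transaction" table_lower then
       acc ++ ["Show recent " ++ table, "Calculate total " ++ table ++ " amount"]
     else if PySem.Str.isIn "product" table_lower || PySem.Str.isIn "item" table_lower then
       acc ++ ["List all " ++ table, "Find " ++ table ++ " by category"]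
     else
       acc ++ ["Show me the " ++ table ++ " data",
               "What's in the " ++ table ++ " table?"])
    = acc ++ [(pvSuggestionPair table).1, (pvSuggestionPair table).2] := by
  unfold pvSuggestionPair
  dsimp only
  split_ifs <;> rfl

-- ===== VERDICT (by name: the statement is the Claim_ definition above) =====
theorem generate_fallback_suggestions_py_spec : Claim_equal_generate_fallback_suggestions_py := by
  intro tables _
  unfold Spec_generate_fallback_suggestions_py
  unfold generate_fallback_suggestions_py generate_fallback_suggestions_py_alt
  match tables with
  | [] => rfl
  | [t] =>
    simp only [List.take, List.foldl, stepA_eq, List.nil_append]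
    simp
  | t1 :: t2 :: rest =>
    match rest with
    | [] =>
      simp only [List.take, List.foldl, stepA_eq, List.nil_append]
      simp [List.take]
    | r :: rs =>
      simp only [List.take, List.foldl, stepA_eq, List.nil_append]
      simp [List.take]
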